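-- pv_equiv track=rewrite | github.com/SpangeWenkies/solana-market-simulator | solana_market_simulator/utils.py | shortvec_length
-- ===== SOURCE A (Python) =====
-- def shortvec_length(value: int) -> int:
--     """
--     Return how many bytes Solana's shortvec variable-length integer encoding would use.
--
--     Solana uses shortvec to encode lengths such as:
--     - number of signatures
--     - number of account keys
--     - number of instructions
--     - number of bytes in instruction data
--
--     This helper does not serialize the value itself; it only tells us how many bytes the
--     encoded length prefix would occupy so we can estimate transaction size.
--
--     7 bits of the value are encoded per byte, and the high bit is a continuation flag.
--     The helper keeps shifting by 7 bits until the remaining value is zero, counting how many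
--     bytes that takes.
--     """
--     if value < 0:
--         raise ValueError("shortvec values must be non-negative")
--
--     length = 1
--     remaining = value >> 7
--     while remaining:
--         length += 1
--         remaining >>= 7
--     return length
-- ===== SOURCE B (Python) =====
-- def shortvec_length(value: int) -> int:
--     """Shortvec length-prefix size in bytes, via a closed form instead of a shift loop."""
--     if value < 0:
--         raise ValueError("shortvec values must be non-negative")
--     return max(1, (value.bit_length() + 6) // 7)
-- ===== Notes on version B (the rewrite author's own statement) =====
-- stated objective: simpler
-- what changed: Replaced the shifting loop with a closed-form ceiling division of the bit length by the per-byte payload width, floored at one byte.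
import Mathlib
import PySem

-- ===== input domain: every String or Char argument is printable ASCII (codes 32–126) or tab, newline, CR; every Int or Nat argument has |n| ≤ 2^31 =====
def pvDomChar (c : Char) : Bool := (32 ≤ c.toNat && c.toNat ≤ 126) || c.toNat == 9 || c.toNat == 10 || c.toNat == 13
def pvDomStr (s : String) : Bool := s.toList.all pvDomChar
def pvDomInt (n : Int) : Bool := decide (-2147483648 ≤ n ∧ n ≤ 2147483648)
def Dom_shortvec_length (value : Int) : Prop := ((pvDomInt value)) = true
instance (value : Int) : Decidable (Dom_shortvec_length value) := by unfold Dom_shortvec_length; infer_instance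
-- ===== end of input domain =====

-- B replaces A's 7-bit shifting loop with the closed form max(1, (bit_length + 6) // 7) (objective: simpler).


-- ===== PORT A =====
-- the while loop: remaining >>= 7 on a non-negative int is division by 128
def shortvecLoop (remaining : Nat) (length : Nat) : Nat :=
  if remaining = 0 then length else shortvecLoop (remaining / 128) (length + 1)
termination_by remaining
decreasing_by exact Nat.div_lt_self (Nat.pos_of_ne_zero ‹_›) (by omega)

def shortvec_length (value : Int) : Int :=
  if value < 0 then 0  -- Python raises ValueError here; excluded by Pre_
  else (shortvecLoop (value.toNat / 128) 1 : Int)  -- remaining = value >> 7; length = 1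

-- ===== PORT B =====
def shortvec_length_alt (value : Int) : Int :=
  if value < 0 then 0  -- Python raises ValueError here; excluded by Pre_
  else max 1 (PySem.Int.floordiv ((PySem.Int.bitLength value : Int) + 6) 7)

-- ===== PRECONDITION & SPEC =====
-- Pre_ excludes exactly the negative inputs, on which A raises ValueError.
def Pre_shortvec_length (value : Int) : Prop := 0 ≤ value
instance (value : Int) : Decidable (Pre_shortvec_length value) := by unfold Pre_shortvec_length; infer_instance
def pvWitness_shortvec_length : Int := (200)

def Spec_shortvec_length (value : Int) (out : Int) : Prop := out = shortvec_length_alt value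
instance (value : Int) (out : Int) : Decidable (Spec_shortvec_length value out) := by unfold Spec_shortvec_length; infer_instance

-- ===== CLAIM (what is proved, stated in full; the proofs are below) =====
def Claim_equal_shortvec_length : Prop := ∀ (value : Int), Dom_shortvec_length value → Pre_shortvec_length value → Spec_shortvec_length value (shortvec_length value)

-- ===== LEMMAS AND PROOFS =====

lemma shortvecLoop_succ (r len : Nat) : shortvecLoop r (len + 1) = shortvecLoop r len + 1 := by
  induction r using Nat.strong_induction_on generalizing len with
  | _ r ih =>
    by_cases h : r = 0
    · rw [shortvecLoop, if_pos h, shortvecLoop, if_pos h]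
    · rw [shortvecLoop, if_neg h]
      conv_rhs => rw [shortvecLoop, if_neg h]
      exact ih _ (Nat.div_lt_self (Nat.pos_of_ne_zero h) (by omega)) _

lemma bitLength_le_of_lt (n : Nat) (h : n < 128) : PySem.Int.bitLength (n : Int) ≤ 7 := by
  by_contra hgt
  rcases Nat.eq_zero_or_pos n with h0 | hpos
  · subst h0; simp [PySem.Int.bitLength_zero] at hgt
  · have h2 := PySem.Int.two_pow_bitLength_le (n : Int) (by exact_mod_cast hpos.ne')
    have : (128 : Nat) ≤ 2 ^ (PySem.Int.bitLength (n : Int) - 1) := by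
      calc (128 : Nat) = 2 ^ 7 := by norm_num
      _ ≤ 2 ^ (PySem.Int.bitLength (n : Int) - 1) := Nat.pow_le_pow_right (by omega) (by omega)
    have : (128 : Nat) ≤ (n : Int).natAbs := le_trans this h2
    rw [Int.natAbs_natCast] at this; omega

lemma bitLength_pos (n : Nat) (h : 0 < n) : 1 ≤ PySem.Int.bitLength (n : Int) := by
  by_contra hlt
  have h2 := PySem.Int.lt_two_pow_bitLength (n : Int)
  have hb : PySem.Int.bitLength (n : Int) = 0 := by omega
  rw [hb] at h2
  simp at h2; omega

lemma bitLength_div128 (n : Nat) (h : 128 ≤ n) :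
    PySem.Int.bitLength (n : Int) = PySem.Int.bitLength ((n / 128 : Nat) : Int) + 7 := by
  have e1 := PySem.Int.bitLength_natCast (m := n) (by omega)
  have e2 := PySem.Int.bitLength_natCast (m := n / 2) (by omega)
  have e3 := PySem.Int.bitLength_natCast (m := n / 2 / 2) (by omega)
  have e4 := PySem.Int.bitLength_natCast (m := n / 2 / 2 / 2) (by omega)
  have e5 := PySem.Int.bitLength_natCast (m := n / 2 / 2 / 2 / 2) (by omega)
  have e6 := PySem.Int.bitLength_natCast (m := n / 2 / 2 / 2 / 2 / 2) (by omega)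
  have e7 := PySem.Int.bitLength_natCast (m := n / 2 / 2 / 2 / 2 / 2 / 2) (by omega)
  have hdd : n / 2 / 2 / 2 / 2 / 2 / 2 / 2 = n / 128 := by
    simp [Nat.div_div_eq_div_mul]
  rw [e1, e2, e3, e4, e5, e6, e7, hdd]

lemma main_nat (n : Nat) :
    shortvecLoop (n / 128) 1 = max 1 ((PySem.Int.bitLength (n : Int) + 6) / 7) := by
  induction n using Nat.strong_induction_on with
  | _ n ih =>
    by_cases h : n < 128
    · have hz : n / 128 = 0 := Nat.div_eq_of_lt h
      rw [hz, shortvecLoop, if_pos rfl]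
      have hb := bitLength_le_of_lt n h
      omega
    · rw [Nat.not_lt] at h
      have hq : 1 ≤ n / 128 := (Nat.one_le_div_iff (by omega)).mpr h
      rw [shortvecLoop, if_neg (by omega), shortvecLoop_succ,
          ih (n / 128) (Nat.div_lt_self (by omega) (by omega)),
          bitLength_div128 n h]
      have hbp := bitLength_pos (n / 128) hq
      omega

lemma main_int (n : Nat) :
    ((shortvecLoop (n / 128) 1 : Nat) : Int)
      = max 1 (PySem.Int.floordiv ((PySem.Int.bitLength (n : Int) : Int) + 6) 7) := by
  have h1 : PySem.Int.floordiv ((PySem.Int.bitLength (n : Int) : Int) + 6) 7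
      = (((PySem.Int.bitLength (n : Int) + 6) / 7 : Nat) : Int) := by
    exact_mod_cast PySem.Int.floordiv_natCast (PySem.Int.bitLength (n : Int) + 6) 7
  rw [h1, main_nat n]
  push_cast
  rfl

theorem main_lemma (value : Int) (h : ¬ value < 0) :
    shortvec_length value = shortvec_length_alt value := by
  rw [shortvec_length, shortvec_length_alt, if_neg h, if_neg h]
  have hv : ((value.toNat : Nat) : Int) = value := Int.toNat_of_nonneg (by omega)
  conv_rhs => rw [← hv]
  exact main_int value.toNat

-- ===== VERDICT (by name: the statement is the Claim_ definition above) =====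
theorem shortvec_length_spec : Claim_equal_shortvec_length := by
  intro value _ hpre
  unfold Spec_shortvec_length
  exact main_lemma value (by unfold Pre_shortvec_length at hpre; omega)
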